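-- pv_equiv track=rewrite | github.com/etssu/prog1 | exam_prep.py | F
-- ===== SOURCE A (Python) =====
-- def F(A):
--     max_sucet = 0
--     max_index = -1
--     index = -1
--     for j in range(len(A[0])): #stlpec
--         sucet = 0
--         index += 1
--         for i in range(len(A)): #riadok
--             sucet += A[i][j]
--         if sucet > max_sucet:
--             max_sucet = sucet
--             max_index = index
--     return max_index
-- ===== SOURCE B (Python) =====
-- def F(A):
--     m = len(A[0])
--     sums = [0] * m
--     for row in A:
--         sums = [sums[j] + row[j] for j in range(m)]
--     best, idx = 0, -1
--     for k in range(m):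
--         if sums[k] > best:
--             best, idx = sums[k], k
--     return idx
-- ===== Notes on version B (the rewrite author's own statement) =====
-- stated objective: alternative
-- what changed: A fuses column-sum and argmax in one column-major nested loop; B first builds the column-sum table by a row-major pass over the rows, then scans that table for the strict-max index in a separate pass.
import Mathlib
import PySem

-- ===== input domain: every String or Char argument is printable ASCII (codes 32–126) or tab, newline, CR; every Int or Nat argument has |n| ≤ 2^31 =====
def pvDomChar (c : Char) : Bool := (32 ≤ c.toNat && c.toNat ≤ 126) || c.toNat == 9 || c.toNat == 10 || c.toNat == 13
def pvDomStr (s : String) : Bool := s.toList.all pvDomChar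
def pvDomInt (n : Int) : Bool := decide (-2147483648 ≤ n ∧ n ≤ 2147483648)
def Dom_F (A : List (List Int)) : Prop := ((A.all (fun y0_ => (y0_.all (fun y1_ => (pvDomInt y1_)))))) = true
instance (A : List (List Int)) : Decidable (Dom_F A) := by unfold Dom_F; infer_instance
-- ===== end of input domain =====

-- B restructures A: instead of A's fused column-major loop (inner pass per column plus
-- running argmax), B builds the column-sum table by a row-major pass and scans it
-- for the strict-max index in a separate pass ("alternative" objective, same cost).

-- ===== PORT A =====
-- Indexing A[i][j] uses getElem? with default; exact for the nonnegative in-range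
-- indices Python uses here (Pre_F excludes the inputs where Python raises IndexError).
def F (A : List (List Int)) : Int :=
  let st := (List.range (A.headD []).length).foldl
    (fun (st : Int × Int × Int) j =>
      let sucet := (List.range A.length).foldl
        (fun s i => s + ((A[i]?.getD [])[j]?.getD 0)) 0
      let index := st.2.2 + 1
      if sucet > st.1 then (sucet, index, index) else (st.1, st.2.1, index))
    (0, -1, -1)
  st.2.1

-- ===== PORT B =====
def F_alt (A : List (List Int)) : Int :=
  let m := (A.headD []).length
  let sums := A.foldl
    (fun sums row => (List.range m).map (fun j => sums[j]?.getD 0 + row[j]?.getD 0))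
    (List.replicate m 0)
  let st := (List.range m).foldl
    (fun (st : Int × Int) (k : Nat) =>
      if sums[k]?.getD 0 > st.1 then (sums[k]?.getD 0, (k : Int)) else st)
    ((0 : Int), (-1 : Int))
  st.2

-- ===== PRECONDITION & SPEC =====
-- Pre_F excludes exactly the inputs where the Python A raises IndexError:
-- an empty A (A[0]) or a row shorter than the first row (A[i][j]).
def Pre_F (A : List (List Int)) : Prop :=
  A ≠ [] ∧ ∀ row ∈ A, (A.headD []).length ≤ row.length
instance (A : List (List Int)) : Decidable (Pre_F A) := by unfold Pre_F; infer_instance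
def pvWitness_F : List (List Int) := [[1, -2], [3, 4]]

def Spec_F (A : List (List Int)) (out : Int) : Prop := out = F_alt A
instance (A : List (List Int)) (out : Int) : Decidable (Spec_F A out) := by unfold Spec_F; infer_instance

-- ===== CLAIM (what is proved, stated in full; the proofs are below) =====
def Claim_equal_F : Prop := ∀ (A : List (List Int)), Dom_F A → Pre_F A → Spec_F A (F A)

-- ===== LEMMAS AND PROOFS =====

-- A's inner index loop over range(len(A)) is a fold over the rows themselves.
theorem fold_range_getD (l : List (List Int)) (j : Nat) :
    ∀ init : Int,
      (List.range l.length).foldl (fun s i => s + ((l[i]?.getD [])[j]?.getD 0)) init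
        = l.foldl (fun s row => s + (row[j]?.getD 0)) init := by
  induction l with
  | nil => intro init; simp
  | cons r t ih =>
      intro init
      simp only [List.length_cons, List.range_succ_eq_map, List.foldl_cons,
        List.foldl_map, List.getElem?_cons_zero, Option.getD_some,
        List.getElem?_cons_succ]
      exact ih _

-- B's row-major build produces the table of column sums.
theorem build_eq (m : Nat) :
    ∀ (rows : List (List Int)) (h : Nat → Int),
      rows.foldl
          (fun sums row => (List.range m).map (fun j => sums[j]?.getD 0 + row[j]?.getD 0))
          ((List.range m).map h)
        = (List.range m).map
            (fun j => rows.foldl (fun s row => s + (row[j]?.getD 0)) (h j)) := by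
  intro rows
  induction rows with
  | nil => intro h; rfl
  | cons r t ih =>
      intro h
      simp only [List.foldl_cons]
      have hstep :
          (List.range m).map (fun j => (((List.range m).map h)[j]?.getD 0) + r[j]?.getD 0)
            = (List.range m).map (fun j => h j + r[j]?.getD 0) := by
        apply List.map_congr_left
        intro j hj
        have hjm : j < m := List.mem_range.mp hj
        simp [List.getElem?_map, List.getElem?_range hjm]
      rw [hstep, ih (fun j => h j + r[j]?.getD 0)]

-- A's fused argmax loop (tracking an index counter) equals B's plain argmax scan.
theorem scan_eq (g : Nat → Int) :
    ∀ (n k : Nat) (ms mi : Int),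
      ((List.range' k n).foldl
          (fun (st : Int × Int × Int) j =>
            let s := g j
            let index := st.2.2 + 1
            if s > st.1 then (s, index, index) else (st.1, st.2.1, index))
          (ms, mi, (k : Int) - 1)).2.1
        = ((List.range' k n).foldl
            (fun (st : Int × Int) j => if g j > st.1 then (g j, (j : Int)) else st)
            (ms, mi)).2 := by
  intro n
  induction n with
  | zero => intro k ms mi; rfl
  | succ n ih =>
      intro k ms mi
      rw [List.range'_succ]
      simp only [List.foldl_cons]
      have h2 : ((k + 1 : Nat) : Int) - 1 = (k : Int) := by push_cast; ring
      by_cases hgt : g k > ms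
      · have := ih (k + 1) (g k) ((k : Int))
        rw [h2] at this
        simp only [if_pos hgt]
        simpa [sub_add_cancel] using this
      · have := ih (k + 1) ms mi
        rw [h2] at this
        simp only [if_neg hgt]
        simpa [sub_add_cancel] using this

theorem F_eq_F_alt (A : List (List Int)) : F A = F_alt A := by
  unfold F F_alt
  simp only [fold_range_getD]
  rw [show (List.replicate (A.headD []).length (0 : Int))
        = (List.range (A.headD []).length).map (fun _ => (0 : Int)) by simp]
  rw [build_eq]
  set m := (A.headD []).length with hm
  have hscan2 :
      (List.range m).foldl
          (fun (st : Int × Int) (k : Nat) =>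
            if (((List.range m).map
                  (fun j => A.foldl (fun s row => s + row[j]?.getD 0) 0))[k]?.getD 0) > st.1
            then ((((List.range m).map
                  (fun j => A.foldl (fun s row => s + row[j]?.getD 0) 0))[k]?.getD 0), (k : Int))
            else st)
          ((0 : Int), (-1 : Int))
        = (List.range m).foldl
            (fun (st : Int × Int) (k : Nat) =>
              if A.foldl (fun s row => s + row[k]?.getD 0) 0 > st.1
              then (A.foldl (fun s row => s + row[k]?.getD 0) 0, (k : Int)) else st)
            ((0 : Int), (-1 : Int)) := by
    apply PySem.List.foldl_congr_mem
    intro acc k hk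
    have hkm : k < m := List.mem_range.mp hk
    simp [List.getElem?_map, List.getElem?_range hkm]
  rw [hscan2]
  have := scan_eq (fun j => A.foldl (fun s row => s + row[j]?.getD 0) 0) m 0 0 (-1)
  rw [List.range_eq_range']
  simpa using this

-- ===== VERDICT (by name: the statement is the Claim_ definition above) =====
theorem F_spec : Claim_equal_F := by
  intro A _ _
  exact F_eq_F_alt A
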